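-- pv_equiv track=rewrite | github.com/david-bogdan-r/ARTEMIS | src/supos.py | MCS
-- ===== SOURCE A (Python) =====
-- def MCS(we:'list'):
--     v2w = {}
--     v1w = {}
--     for we in we:
--         v1, v2, w = we
--         if v1 not in v2w:
--             v2w[v1] = v2, w
--         else:
--             if w < v2w[v1][1]:
--                 v2w[v1] = v2, w
--         if v2 not in v1w:
--             v1w[v2] = v1, w
--         else:
--             if w < v1w[v2][1]:
--                 v1w[v2] = v1, w
--     vv = []
--     for v2 in v1w.keys():
--         v1, w = v1w[v2]
--         if v2w[v1][0] == v2: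
--             vv.append((v1, v2))
--     return vv
-- ===== SOURCE B (Python) =====
-- def MCS(we: 'list'):
--     vv = []
--     for v2 in dict.fromkeys(e[1] for e in we):
--         v1 = min(((e[0], e[2]) for e in we if e[1] == v2), key=lambda t: t[1])[0]
--         if min(((e[1], e[2]) for e in we if e[0] == v1), key=lambda t: t[1])[0] == v2:
--             vv.append((v1, v2))
--     return vv
-- ===== Notes on version B (the rewrite author's own statement) =====
-- stated objective: alternative
-- what changed: A streams the edges once, maintaining two best-so-far dicts with running strict-min updates; B uses no dicts at all: it dedups the v2 endpoints in first-occurrence order and, for each v2, recomputes the minimum-weight partner by a fresh filtered scan of the edge list (and one more filtered scan for the mutual check).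
import Mathlib
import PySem

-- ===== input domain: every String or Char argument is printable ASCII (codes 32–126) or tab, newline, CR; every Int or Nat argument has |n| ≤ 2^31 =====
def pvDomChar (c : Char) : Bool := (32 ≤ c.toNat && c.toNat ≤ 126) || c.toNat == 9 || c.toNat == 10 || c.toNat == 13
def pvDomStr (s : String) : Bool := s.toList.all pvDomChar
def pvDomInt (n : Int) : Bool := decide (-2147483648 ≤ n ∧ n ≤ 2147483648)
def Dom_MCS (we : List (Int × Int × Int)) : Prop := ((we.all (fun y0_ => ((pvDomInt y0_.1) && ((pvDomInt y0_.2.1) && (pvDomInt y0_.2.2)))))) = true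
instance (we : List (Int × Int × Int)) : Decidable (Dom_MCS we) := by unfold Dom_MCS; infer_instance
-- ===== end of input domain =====

-- B replaces A's two streaming best-so-far dicts by dict-free per-endpoint filtered scans (alternative decomposition, no dicts).

-- ===== PORT A =====
-- Python's v2w[v1] / v1w[v2] lookups are ported as getD with a dummy default; they are only
-- reached when the key is present (it was inserted by the same loop), so this is exact.
def pvStepA (st : PySem.Dict Int (Int × Int) × PySem.Dict Int (Int × Int)) (e : Int × Int × Int) :
    PySem.Dict Int (Int × Int) × PySem.Dict Int (Int × Int) :=
  let v2w := if st.1.contains e.1 = false then st.1.insert e.1 (e.2.1, e.2.2)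
             else if e.2.2 < (st.1.getD e.1 (0, 0)).2 then st.1.insert e.1 (e.2.1, e.2.2) else st.1
  let v1w := if st.2.contains e.2.1 = false then st.2.insert e.2.1 (e.1, e.2.2)
             else if e.2.2 < (st.2.getD e.2.1 (0, 0)).2 then st.2.insert e.2.1 (e.1, e.2.2) else st.2
  (v2w, v1w)

def MCS (we : List (Int × Int × Int)) : List (Int × Int) :=
  let st := we.foldl pvStepA (PySem.Dict.empty, PySem.Dict.empty)
  st.2.keys.foldl (fun vv v2 =>
    let v1 := (st.2.getD v2 (0, 0)).1
    if (st.1.getD v1 (0, 0)).1 = v2 then vv ++ [(v1, v2)] else vv) []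

-- ===== PORT B =====
-- min(gen, key=lambda t: t[1])[0]; B only calls it on nonempty lists, so the default is never used.
def pvMinFst (es : List (Int × Int)) : Int := ((PySem.List.min? es (fun t => t.2)).getD (0, 0)).1

def MCS_alt (we : List (Int × Int × Int)) : List (Int × Int) :=
  (PySem.List.dedup (we.map (fun e => e.2.1))).foldl (fun vv v2 =>
    let v1 := pvMinFst ((we.filter (fun e => e.2.1 == v2)).map (fun e => (e.1, e.2.2)))
    if pvMinFst ((we.filter (fun e => e.1 == v1)).map (fun e => (e.2.1, e.2.2))) = v2
    then vv ++ [(v1, v2)] else vv) []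

-- ===== PRECONDITION & SPEC =====
def Spec_MCS (we : List (Int × Int × Int)) (out : List (Int × Int)) : Prop := out = MCS_alt we
instance (we : List (Int × Int × Int)) (out : List (Int × Int)) : Decidable (Spec_MCS we out) := by unfold Spec_MCS; infer_instance

-- ===== CLAIM (what is proved, stated in full; the proofs are below) =====
def Claim_equal_MCS : Prop := ∀ (we : List (Int × Int × Int)), Dom_MCS we → Spec_MCS we (MCS we)

-- ===== LEMMAS AND PROOFS =====

-- the per-endpoint edge groups B scans: partners-with-weights of v1 = k resp. v2 = k, in list order
def pvG1 (we : List (Int × Int × Int)) (k : Int) : List (Int × Int) :=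
  (we.filter (fun e => e.1 == k)).map (fun e => (e.2.1, e.2.2))
def pvG2 (we : List (Int × Int × Int)) (k : Int) : List (Int × Int) :=
  (we.filter (fun e => e.2.1 == k)).map (fun e => (e.1, e.2.2))

-- loop invariant: A's streaming dicts hold exactly the first minimum of each group,
-- and the v1w key order is the first-occurrence order of the v2 endpoints
def pvInv (we : List (Int × Int × Int))
    (st : PySem.Dict Int (Int × Int) × PySem.Dict Int (Int × Int)) : Prop :=
  (∀ k, st.1.get? k = PySem.List.min? (pvG1 we k) (fun t => t.2)) ∧
  (∀ k, st.2.get? k = PySem.List.min? (pvG2 we k) (fun t => t.2)) ∧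
  st.2.keys = PySem.Set.ofList (we.map (fun e => e.2.1))

theorem pvMin?_append (es : List (Int × Int)) (x : Int × Int) :
    PySem.List.min? (es ++ [x]) (fun t => t.2) =
      match PySem.List.min? es (fun t => t.2) with
      | none => some x
      | some m => if x.2 < m.2 then some x else some m := by
  cases hm : PySem.List.min? es (fun t => t.2) with
  | none => simp only [PySem.List.min?] at hm ⊢; rw [List.foldl_append, hm]; rfl
  | some m => simp only [PySem.List.min?] at hm ⊢; rw [List.foldl_append, hm]; rfl

theorem pvG1_append (we : List (Int × Int × Int)) (e : Int × Int × Int) (k : Int) :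
    pvG1 (we ++ [e]) k = pvG1 we k ++ (if e.1 = k then [(e.2.1, e.2.2)] else []) := by
  simp only [pvG1, List.filter_append, List.map_append]
  by_cases h : e.1 = k <;> simp [h]

theorem pvG2_append (we : List (Int × Int × Int)) (e : Int × Int × Int) (k : Int) :
    pvG2 (we ++ [e]) k = pvG2 we k ++ (if e.2.1 = k then [(e.1, e.2.2)] else []) := by
  simp only [pvG2, List.filter_append, List.map_append]
  by_cases h : e.2.1 = k <;> simp [h]

-- one streaming-min dict update tracks appending the edge to its group
theorem pvStepGet (d : PySem.Dict Int (Int × Int)) (g : Int → List (Int × Int))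
    (h : ∀ k, d.get? k = PySem.List.min? (g k) (fun t => t.2)) (a : Int) (x : Int × Int) (k : Int) :
    (if d.contains a = false then d.insert a x
     else if x.2 < (d.getD a (0, 0)).2 then d.insert a x else d).get? k
      = PySem.List.min? (g k ++ (if a = k then [x] else [])) (fun t => t.2) := by
  by_cases hk : k = a
  · subst hk
    rw [if_pos rfl, pvMin?_append, ← h k]
    by_cases hc : d.contains k = true
    · obtain ⟨m, hm⟩ := Option.isSome_iff_exists.mp
        ((PySem.Dict.contains_eq_isSome_get? d k) ▸ hc)
      rw [if_neg (by simp [hc]), PySem.Dict.getD_of_get?_eq_some d (0, 0) hm, hm]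
      by_cases hlt : x.2 < m.2 <;> simp [hlt, PySem.Dict.get?_insert_self, hm]
    · have hc' : d.contains k = false := by simpa using hc
      have hnone : d.get? k = none := by
        have := PySem.Dict.contains_eq_isSome_get? d k
        rw [hc'] at this
        simpa using this.symm
      rw [if_pos hc', PySem.Dict.get?_insert_self, hnone]
  · have hne : ¬ a = k := fun h' => hk h'.symm
    rw [if_neg hne, List.append_nil, ← h k]
    split_ifs <;> simp [PySem.Dict.get?_insert_of_ne d x hk, h k]

-- the v1w key list grows exactly like the ordered dedup of the v2 projection
theorem pvStepKeys (d : PySem.Dict Int (Int × Int)) (l : List Int)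
    (h : d.keys = PySem.Set.ofList l) (a : Int) (x : Int × Int) :
    (if d.contains a = false then d.insert a x
     else if x.2 < (d.getD a (0, 0)).2 then d.insert a x else d).keys
      = PySem.Set.ofList (l ++ [a]) := by
  rw [PySem.Set.ofList_append_singleton]
  by_cases hc : d.contains a = true
  · have hm : a ∈ PySem.Set.ofList l := h ▸ (PySem.Dict.contains_iff_mem_keys d a).mp hc
    have hsc : (PySem.Set.ofList l).contains a = true := (PySem.Set.contains_iff _ _).mpr hm
    have hadd : (PySem.Set.ofList l).add a = PySem.Set.ofList l := by
      simp only [PySem.Set.add, hsc, if_true]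
    rw [if_neg (by simp [hc]), hadd, ← h]
    split_ifs with hlt
    · exact PySem.Dict.keys_insert_of_contains d x hc
    · rfl
  · have hc' : d.contains a = false := by simpa using hc
    have hm : a ∉ PySem.Set.ofList l := fun hmem =>
      hc ((PySem.Dict.contains_iff_mem_keys d a).mpr (by rw [h]; exact hmem))
    have hsc : (PySem.Set.ofList l).contains a = false := by
      rw [Bool.eq_false_iff]
      exact fun hc2 => hm ((PySem.Set.contains_iff _ _).mp hc2)
    have hadd : (PySem.Set.ofList l).add a = PySem.Set.ofList l ++ [a] := by
      simp only [PySem.Set.add, hsc, if_false, Bool.false_eq_true]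
    rw [if_pos hc', hadd, ← h]
    exact PySem.Dict.keys_insert_of_not_contains d x hc'

theorem pvInv_step (we : List (Int × Int × Int)) (e : Int × Int × Int)
    (st : PySem.Dict Int (Int × Int) × PySem.Dict Int (Int × Int))
    (h : pvInv we st) : pvInv (we ++ [e]) (pvStepA st e) := by
  obtain ⟨h1, h2, hk⟩ := h
  refine ⟨fun k => ?_, fun k => ?_, ?_⟩
  · rw [pvG1_append]
    exact pvStepGet st.1 (pvG1 we) h1 e.1 (e.2.1, e.2.2) k
  · rw [pvG2_append]
    exact pvStepGet st.2 (pvG2 we) h2 e.2.1 (e.1, e.2.2) k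
  · have := pvStepKeys st.2 (we.map (fun e => e.2.1)) hk e.2.1 (e.1, e.2.2)
    simpa [List.map_append] using this

theorem pvInv_foldl (we : List (Int × Int × Int)) :
    pvInv we (we.foldl pvStepA (PySem.Dict.empty, PySem.Dict.empty)) := by
  rw [← List.reverse_reverse we]
  induction we.reverse with
  | nil =>
    exact ⟨fun k => by simp [PySem.Dict.get?_empty, pvG1, PySem.List.min?],
           fun k => by simp [PySem.Dict.get?_empty, pvG2, PySem.List.min?],
           by simp [PySem.Dict.keys_empty, PySem.Set.ofList]⟩
  | cons e es ih =>
    rw [List.reverse_cons, List.foldl_append]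
    exact pvInv_step es.reverse e _ ih

-- groups are nonempty where B scans them
theorem pvG2_ne_nil (we : List (Int × Int × Int)) (v2 : Int)
    (h : v2 ∈ we.map (fun e => e.2.1)) : pvG2 we v2 ≠ [] := by
  obtain ⟨e, he, hv⟩ := List.mem_map.mp h
  have : e ∈ we.filter (fun e => e.2.1 == v2) := List.mem_filter.mpr ⟨he, by simp [hv]⟩
  simp only [pvG2, ne_eq, List.map_eq_nil_iff]
  exact fun hn => by rw [hn] at this; cases this

theorem pvMin?_some (es : List (Int × Int)) (h : es ≠ []) :
    ∃ m, PySem.List.min? es (fun t => t.2) = some m := by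
  cases hm : PySem.List.min? es (fun t => t.2) with
  | none => exact absurd ((PySem.List.min?_eq_none_iff _ _).mp hm) h
  | some m => exact ⟨m, rfl⟩

-- ===== VERDICT (by name: the statement is the Claim_ definition above) =====
theorem MCS_spec : Claim_equal_MCS := by
  intro we _
  show MCS we = MCS_alt we
  obtain ⟨h1, h2, hk⟩ := pvInv_foldl we
  unfold MCS MCS_alt
  rw [PySem.List.dedup_eq_ofList, ← hk]
  apply PySem.List.foldl_congr_mem
  intro acc v2 hv2
  have hv2' : v2 ∈ we.map (fun e => e.2.1) := by
    rw [hk] at hv2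
    exact (PySem.Set.mem_ofList _ _).mp hv2
  obtain ⟨m2, hm2⟩ := pvMin?_some _ (pvG2_ne_nil we v2 hv2')
  have hgd2 : (we.foldl pvStepA (PySem.Dict.empty, PySem.Dict.empty)).2.getD v2 (0, 0) = m2 :=
    PySem.Dict.getD_of_get?_eq_some _ (0, 0) ((h2 v2).trans hm2)
  have hb2 : pvMinFst (pvG2 we v2) = m2.1 := by simp only [pvMinFst, hm2, Option.getD_some]
  have hm2mem : m2 ∈ pvG2 we v2 := PySem.List.min?_mem hm2
  obtain ⟨e', he', hee⟩ := List.mem_map.mp hm2mem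
  have he'we : e' ∈ we := (List.mem_filter.mp he').1
  have he1 : e'.1 = m2.1 := by rw [← hee]
  have hg1ne : pvG1 we m2.1 ≠ [] := by
    have : e' ∈ we.filter (fun e => e.1 == m2.1) :=
      List.mem_filter.mpr ⟨he'we, by simp [he1]⟩
    simp only [pvG1, ne_eq, List.map_eq_nil_iff]
    exact fun hn => by rw [hn] at this; cases this
  obtain ⟨m1, hm1⟩ := pvMin?_some _ hg1ne
  have hgd1 : (we.foldl pvStepA (PySem.Dict.empty, PySem.Dict.empty)).1.getD m2.1 (0, 0) = m1 :=
    PySem.Dict.getD_of_get?_eq_some _ (0, 0) ((h1 m2.1).trans hm1)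
  have hb1 : pvMinFst (pvG1 we m2.1) = m1.1 := by simp only [pvMinFst, hm1, Option.getD_some]
  simp only [pvG1, pvG2] at hb1 hb2
  simp only [hgd2, hb2, hgd1, hb1]
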